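-- pv_equiv track=rewrite | github.com/yosefshatila00/DI-bootcamp | week_2/day_1/dailyexc.py | process_col
-- ===== SOURCE A (Python) =====
-- def process_col(matrix):
--     decoded_chars = []
--     num_cols = len(matrix[0]) if matrix else 0
--
--     for col in range(num_cols):
--         for row in range(len(matrix)):
--             char = matrix[row][col]
--             if char.isalpha():
--                 decoded_chars.append(char)
--             else:
--                 if decoded_chars and decoded_chars[-1].isalpha():
--                     decoded_chars.append(' ')
--
--     decoded_message = "".join(decoded_chars).strip()
--     decoded_message = " ".join(decoded_message.split())
--     return decoded_message
-- ===== SOURCE B (Python) =====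
-- def process_col(matrix):
--     num_cols = len(matrix[0]) if matrix else 0
--     cells = [matrix[row][col] for col in range(num_cols) for row in range(len(matrix))]
--     return " ".join(_words(cells))
--
-- def _words(cells):
--     words = []
--     i, n = 0, len(cells)
--     while i < n:
--         if not cells[i].isalpha():
--             i += 1
--             continue
--         j = i
--         while j < n and cells[j].isalpha():
--             j += 1
--         words.append("".join(cells[i:j]))
--         i = j
--     return words
-- ===== Notes on version B (the rewrite author's own statement) =====
-- stated objective: alternative
-- what changed: A accumulates a char buffer with sentinel spaces and renormalizes it with join/strip/split/join; B builds the column-major cell list with a comprehension and then extracts maximal runs of alpha cells with a two-pointer scan, joining the words once.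
import Mathlib
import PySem

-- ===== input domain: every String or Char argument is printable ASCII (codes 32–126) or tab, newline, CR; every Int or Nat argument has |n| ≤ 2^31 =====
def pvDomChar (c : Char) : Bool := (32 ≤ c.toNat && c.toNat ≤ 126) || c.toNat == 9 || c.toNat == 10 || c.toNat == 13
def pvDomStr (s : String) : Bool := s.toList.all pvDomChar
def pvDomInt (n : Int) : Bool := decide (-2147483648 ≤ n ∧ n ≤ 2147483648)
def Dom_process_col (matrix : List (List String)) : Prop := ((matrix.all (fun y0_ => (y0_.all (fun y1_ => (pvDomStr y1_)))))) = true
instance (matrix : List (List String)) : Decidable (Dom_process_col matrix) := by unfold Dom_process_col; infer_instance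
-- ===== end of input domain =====

-- B replaces A's append-then-renormalize pipeline (char buffer with sentinel spaces, then
-- join/strip/split/join) by a comprehension building the column-major cell list and a
-- two-pointer scan extracting maximal alpha runs; objective: alternative.

-- ===== PORT A =====
-- loop body of A's inner for-loop, named for readability (same code, same state)
def stepA (dc : List String) (char : String) : List String :=
  if PySem.Str.strIsalpha char then dc ++ [char]
  else if !dc.isEmpty && PySem.Str.strIsalpha (PySem.List.pyGetD dc (-1) "") then dc ++ [" "]
  else dc

def process_col (matrix : List (List String)) : String :=
  let num_cols : Int := if !matrix.isEmpty then ((PySem.List.pyGetD matrix 0 []).length : Int) else 0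
  let decoded_chars : List String :=
    (PySem.List.pyRange 0 num_cols).foldl (fun dc col =>
      (PySem.List.pyRange 0 (matrix.length : Int)).foldl (fun dc row =>
        stepA dc (PySem.List.pyGetD (PySem.List.pyGetD matrix row []) col "")) dc) []
  let decoded_message := PySem.Str.strip (PySem.Str.join "" decoded_chars)
  PySem.Str.join " " (PySem.Str.split₀ decoded_message)

-- ===== PORT B =====
-- B's _words: two-pointer scan (skip a non-alpha cell, or consume the maximal alpha run),
-- rendered as structural recursion on the suffix of the cell list
def wordsB : List String → List String
  | [] => []
  | c :: cs =>
    if PySem.Str.strIsalpha c then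
      PySem.Str.join "" ((c :: cs).takeWhile PySem.Str.strIsalpha)
        :: wordsB ((c :: cs).dropWhile PySem.Str.strIsalpha)
    else wordsB cs
termination_by l => l.length
decreasing_by
  · simp only [List.dropWhile]
    split
    · exact Nat.lt_succ_of_le (List.length_dropWhile_le _ _)
    · simp_all
  · simp

def process_col_alt (matrix : List (List String)) : String :=
  let num_cols : Int := if !matrix.isEmpty then ((PySem.List.pyGetD matrix 0 []).length : Int) else 0
  let cells : List String :=
    (PySem.List.pyRange 0 num_cols).flatMap (fun col =>
      (PySem.List.pyRange 0 (matrix.length : Int)).map (fun row =>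
        PySem.List.pyGetD (PySem.List.pyGetD matrix row []) col ""))
  PySem.Str.join " " (wordsB cells)

-- ===== PRECONDITION & SPEC =====
-- Pre_ excludes exactly the ragged matrices on which Python A raises IndexError:
-- every row must be at least as long as row 0 (the column loop runs over len(matrix[0])).
def Pre_process_col (matrix : List (List String)) : Prop :=
  ∀ r ∈ matrix, (matrix.headD []).length ≤ r.length
instance (matrix : List (List String)) : Decidable (Pre_process_col matrix) := by
  unfold Pre_process_col; infer_instance

def pvWitness_process_col : List (List String) := [["h", "l", "1"], ["e", "l", "o"]]

def Spec_process_col (matrix : List (List String)) (out : String) : Prop := out = process_col_alt matrix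
instance (matrix : List (List String)) (out : String) : Decidable (Spec_process_col matrix out) := by
  unfold Spec_process_col; infer_instance

-- ===== CLAIM (what is proved, stated in full; the proofs are below) =====
def Claim_equal_process_col : Prop := ∀ (matrix : List (List String)), Dom_process_col matrix → Pre_process_col matrix → Spec_process_col matrix (process_col matrix)

-- ===== LEMMAS AND PROOFS =====

-- proof-side fold mirroring B's scan: state = (finished words, current run of alpha cells)
def stepB (st : List String × List String) (cell : String) : List String × List String :=
  if PySem.Str.strIsalpha cell then (st.1, st.2 ++ [cell])
  else if !st.2.isEmpty then (st.1 ++ [PySem.Str.join "" st.2], ([] : List String))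
  else st

def finishB (st : List String × List String) : List String :=
  if !st.2.isEmpty then st.1 ++ [PySem.Str.join "" st.2] else st.1

-- a finished word: a nonempty run of alpha cells
def AlphaRun (r : List String) : Prop := r ≠ [] ∧ ∀ x ∈ r, PySem.Str.strIsalpha x = true

-- A's buffer contents corresponding to scan state (finished runs, current run)
def accOf (runs : List (List String)) (cur : List String) : List String :=
  runs.flatMap (fun r => r ++ [" "]) ++ cur

def joinRun (r : List String) : String := PySem.Str.join "" r

def blockOf (r : List String) : List Char := (r.map String.toList).flatten

theorem foldl_nested {α β σ : Type} (cols : List α) (cell : α → List β) (g : σ → β → σ) :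
    ∀ (L : List β) (init : σ),
    cols.foldl (fun a c => (cell c).foldl g a) (L.foldl g init)
      = (cols.foldl (fun l c => l ++ cell c) L).foldl g init := by
  induction cols with
  | nil => intro L init; rfl
  | cons c cols ih =>
      intro L init
      simpa [← List.foldl_append] using ih (L ++ cell c) init

theorem go_nil (cur : List Char) (acc : List (List Char)) :
    PySem.Chars.split₀.go [] cur acc = if cur.isEmpty then acc.reverse else (cur.reverse :: acc).reverse := rfl
theorem go_cons (c : Char) (rest cur : List Char) (acc : List (List Char)) :
    PySem.Chars.split₀.go (c :: rest) cur acc =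
      if PySem.Chars.isspace c then (if cur.isEmpty then PySem.Chars.split₀.go rest [] acc else PySem.Chars.split₀.go rest [] (cur.reverse :: acc))
      else PySem.Chars.split₀.go rest (c :: cur) acc := rfl

theorem go_snoc_space (c : Char) (hc : PySem.Chars.isspace c = true) :
    ∀ (s cur : List Char) (acc : List (List Char)),
      PySem.Chars.split₀.go (s ++ [c]) cur acc = PySem.Chars.split₀.go s cur acc := by
  intro s
  induction s with
  | nil =>
      intro cur acc
      simp only [List.nil_append, go_cons, go_nil, hc, if_true]
      by_cases h : cur.isEmpty <;> simp [h]
  | cons d s ih =>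
      intro cur acc
      simp only [List.cons_append, go_cons]
      by_cases hd : PySem.Chars.isspace d <;> simp [hd, ih]

theorem go_append_spaces (sp : List Char) (hsp : ∀ c ∈ sp, PySem.Chars.isspace c = true) :
    ∀ (s cur : List Char) (acc : List (List Char)),
      PySem.Chars.split₀.go (s ++ sp) cur acc = PySem.Chars.split₀.go s cur acc := by
  induction sp with
  | nil => simp
  | cons c sp ih =>
      intro s cur acc
      have h : s ++ c :: sp = (s ++ [c]) ++ sp := by simp
      rw [h, ih (fun d hd => hsp d (by simp [hd])), go_snoc_space c (hsp c (by simp))]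

theorem split₀_lstrip (s : List Char) :
    PySem.Chars.split₀ (PySem.Chars.lstrip s) = PySem.Chars.split₀ s := by
  induction s with
  | nil => rfl
  | cons c s ih =>
      by_cases hc : PySem.Chars.isspace c = true
      · have h1 : PySem.Chars.lstrip (c :: s) = PySem.Chars.lstrip s := by
          simp [PySem.Chars.lstrip, hc]
        have h2 : PySem.Chars.split₀ (c :: s) = PySem.Chars.split₀ s := by
          simp [PySem.Chars.split₀, go_cons, hc]
        rw [h1, ih, h2]
      · simp [PySem.Chars.lstrip, Bool.not_eq_true _ ▸ hc]

theorem split₀_strip (s : List Char) :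
    PySem.Chars.split₀ (PySem.Chars.strip s) = PySem.Chars.split₀ s := by
  rw [PySem.Chars.strip, ← split₀_lstrip s]
  set t := PySem.Chars.lstrip s with ht
  have hdecomp : PySem.Chars.rstrip t ++ (t.reverse.takeWhile PySem.Chars.isspace).reverse = t := by
    simp [PySem.Chars.rstrip, ← List.reverse_append]
  conv_rhs => rw [← hdecomp]
  rw [PySem.Chars.split₀, PySem.Chars.split₀,
    go_append_spaces _ (fun c hc => List.mem_takeWhile_imp (by simpa using hc))]

theorem go_run (w : List Char) (hw : ∀ c ∈ w, PySem.Chars.isspace c = false) :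
    ∀ (rest cur : List Char) (acc : List (List Char)),
      PySem.Chars.split₀.go (w ++ rest) cur acc
        = PySem.Chars.split₀.go rest (w.reverse ++ cur) acc := by
  induction w with
  | nil => simp
  | cons c w ih =>
      intro rest cur acc
      rw [List.cons_append, go_cons, if_neg (by simp [hw c (by simp)])]
      rw [ih (fun d hd => hw d (by simp [hd])) rest (c :: cur) acc]
      simp

theorem go_blocks (blocks : List (List Char))
    (hb : ∀ b ∈ blocks, b ≠ [] ∧ ∀ c ∈ b, PySem.Chars.isspace c = false) :
    ∀ (rest : List Char) (acc : List (List Char)),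
      PySem.Chars.split₀.go (blocks.flatMap (fun b => b ++ [' ']) ++ rest) [] acc
        = PySem.Chars.split₀.go rest [] (blocks.reverse ++ acc) := by
  induction blocks with
  | nil => simp
  | cons b bs ih =>
      intro rest acc
      obtain ⟨hne, hns⟩ := hb b (by simp)
      have h1 : (b :: bs).flatMap (fun b => b ++ [' ']) ++ rest
          = b ++ (' ' :: (bs.flatMap (fun b => b ++ [' ']) ++ rest)) := by simp
      rw [h1, go_run b hns, go_cons, if_pos (by decide),
        if_neg (by simp [List.isEmpty_iff, hne])]
      simp only [List.append_nil, List.reverse_reverse]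
      rw [ih (fun x hx => hb x (by simp [hx]))]
      simp

theorem split₀_shape (blocks : List (List Char)) (tail : List Char)
    (hb : ∀ b ∈ blocks, b ≠ [] ∧ ∀ c ∈ b, PySem.Chars.isspace c = false)
    (ht : ∀ c ∈ tail, PySem.Chars.isspace c = false) :
    PySem.Chars.split₀ (blocks.flatMap (fun b => b ++ [' ']) ++ tail)
      = blocks ++ (if tail = [] then [] else [tail]) := by
  rw [PySem.Chars.split₀, go_blocks blocks hb tail []]
  cases tail with
  | nil => simp [go_nil]
  | cons c t =>
      rw [show (c :: t) = (c :: t) ++ ([] : List Char) by simp, go_run _ (by simpa using ht)]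
      simp [go_nil]

theorem isalpha_not_isspace (c : Char) (h : PySem.Chars.isalpha c = true) :
    PySem.Chars.isspace c = false := by
  simp only [PySem.Chars.isalpha, PySem.Chars.isupper, PySem.Chars.islower, Bool.or_eq_true,
    Bool.and_eq_true, decide_eq_true_eq, Char.le_def, UInt32.le_iff_toNat_le] at h
  have hn : 65 ≤ c.toNat ∧ c.toNat ≤ 90 ∨ 97 ≤ c.toNat ∧ c.toNat ≤ 122 := by
    exact_mod_cast h
  simp only [PySem.Chars.isspace, Bool.or_eq_false_iff, Bool.and_eq_false_iff,
    decide_eq_false_iff_not, not_le]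
  omega

theorem join_nil_flatten (l : List (List Char)) :
    PySem.Chars.join [] l = l.flatten := by
  rw [PySem.Chars.join]
  induction l with
  | nil => rfl
  | cons x l ih =>
      cases l with
      | nil => simp [List.intercalate]
      | cons y l =>
          simp only [List.intercalate, List.intersperse] at *
          simp_all

theorem joinRun_eq (r : List String) : joinRun r = String.ofList (blockOf r) := by
  simp [joinRun, PySem.Str.join, blockOf, join_nil_flatten]

theorem accOf_nil_snoc_space (runs : List (List String)) (h : runs ≠ []) :
    ∃ t, accOf runs [] = t ++ [" "] := by
  induction runs with
  | nil => exact absurd rfl h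
  | cons r rs ih =>
      cases rs with
      | nil => exact ⟨r, by simp [accOf]⟩
      | cons r' rs' =>
          obtain ⟨t, ht⟩ := ih (by simp)
          refine ⟨r ++ " " :: t, ?_⟩
          simp only [accOf, List.append_nil] at ht ⊢
          simp [ht]

theorem strIsalpha_space_false : PySem.Str.strIsalpha " " = false := by decide

-- the lockstep invariant: A's buffer and the scan state evolve together over the cell list
theorem lockstep (cells : List String) :
    ∀ (runs : List (List String)) (cur : List String),
      (∀ r ∈ runs, AlphaRun r) → (∀ x ∈ cur, PySem.Str.strIsalpha x = true) →
      ∃ runs' cur', (∀ r ∈ runs', AlphaRun r) ∧ (∀ x ∈ cur', PySem.Str.strIsalpha x = true) ∧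
        cells.foldl stepA (accOf runs cur) = accOf runs' cur' ∧
        cells.foldl stepB (runs.map joinRun, cur) = (runs'.map joinRun, cur') := by
  induction cells with
  | nil => exact fun runs cur h1 h2 => ⟨runs, cur, h1, h2, rfl, rfl⟩
  | cons c cs ih =>
      intro runs cur h1 h2
      simp only [List.foldl_cons]
      by_cases hc : PySem.Str.strIsalpha c = true
      · have hA : stepA (accOf runs cur) c = accOf runs (cur ++ [c]) := by
          simp only [stepA, hc, if_true]
          simp [accOf]
        have hB : stepB (runs.map joinRun, cur) c = (runs.map joinRun, cur ++ [c]) := by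
          simp only [stepB, hc, if_true]
        rw [hA, hB]
        exact ih runs (cur ++ [c]) h1 (by
          intro x hx
          rcases List.mem_append.mp hx with h | h
          · exact h2 x h
          · simp at h; subst h; exact hc)
      · have hc' : PySem.Str.strIsalpha c = false := by simpa using hc
        have hB : stepB (runs.map joinRun, cur) c =
            (if !cur.isEmpty then (runs.map joinRun ++ [joinRun cur], ([] : List String))
             else (runs.map joinRun, cur)) := by
          simp only [stepB, hc', Bool.false_eq_true, if_false, joinRun]
        by_cases hcur : cur = []
        · subst hcur
          have hA : stepA (accOf runs []) c = accOf runs [] := by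
            cases hr : runs with
            | nil =>
                simp only [stepA, hc', Bool.false_eq_true, if_false]
                simp [accOf]
            | cons r rs =>
                obtain ⟨t, ht⟩ := accOf_nil_snoc_space runs (by simp [hr])
                rw [← hr, ht]
                simp only [stepA, hc', Bool.false_eq_true, if_false,
                  PySem.List.pyGetD_neg_one_append_singleton, strIsalpha_space_false,
                  Bool.and_false, if_false]
          rw [hA, hB]
          simpa using ih runs [] h1 (by simp)
        · obtain ⟨t, x, rfl⟩ : ∃ t x, cur = t ++ [x] := by
            rcases List.eq_nil_or_concat cur with h | ⟨t, x, h⟩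
            · exact absurd h hcur
            · exact ⟨t, x, by simpa using h⟩
          have hA : stepA (accOf runs (t ++ [x])) c = accOf (runs ++ [t ++ [x]]) [] := by
            have hx : PySem.Str.strIsalpha x = true := h2 x (by simp)
            have hget : PySem.List.pyGetD (accOf runs (t ++ [x])) (-1) "" = x := by
              rw [show accOf runs (t ++ [x]) = (runs.flatMap (fun r => r ++ [" "]) ++ t) ++ [x] by
                simp [accOf]]
              exact PySem.List.pyGetD_neg_one_append_singleton _ _ _
            simp only [stepA, hc', Bool.false_eq_true, if_false, hget, hx, Bool.and_true]
            rw [if_pos (by simp [accOf])]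
            simp [accOf]
          rw [hA, hB]
          rw [if_pos (by simp)]
          have hmap : runs.map joinRun ++ [joinRun (t ++ [x])] = (runs ++ [t ++ [x]]).map joinRun := by
            simp
          rw [hmap]
          exact ih (runs ++ [t ++ [x]]) [] (by
            intro r hr
            rcases List.mem_append.mp hr with h | h
            · exact h1 r h
            · simp at h; subst h; exact ⟨by simp, h2⟩) (by simp)

theorem chars_accOf (runs : List (List String)) (cur : List String) :
    ((accOf runs cur).map String.toList).flatten
      = (runs.map blockOf).flatMap (fun b => b ++ [' ']) ++ (cur.map String.toList).flatten := by
  induction runs with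
  | nil => simp [accOf]
  | cons r rs ih =>
      have h : accOf (r :: rs) cur = (r ++ [" "]) ++ accOf rs cur := by simp [accOf]
      rw [h]
      simp only [List.map_append, List.flatten_append, ih, List.map_cons, List.flatMap_cons]
      simp [blockOf]

theorem blockOf_props (r : List String) (h : AlphaRun r) :
    blockOf r ≠ [] ∧ ∀ c ∈ blockOf r, PySem.Chars.isspace c = false := by
  obtain ⟨hne, hall⟩ := h
  constructor
  · cases r with
    | nil => exact absurd rfl hne
    | cons x xs =>
        have hx := hall x (by simp)
        have : x.toList ≠ [] := by
          simp only [PySem.Str.strIsalpha, PySem.Chars.strIsalpha, Bool.and_eq_true,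
            Bool.not_eq_true', List.isEmpty_eq_false_iff] at hx
          exact hx.1
        simp only [blockOf, List.map_cons, List.flatten_cons]
        intro hcontra
        exact this (List.append_eq_nil_iff.mp hcontra).1
  · intro c hc
    simp only [blockOf, List.mem_flatten, List.mem_map] at hc
    obtain ⟨l, ⟨x, hxr, rfl⟩, hcl⟩ := hc
    have hx := hall x hxr
    simp only [PySem.Str.strIsalpha, PySem.Chars.strIsalpha, Bool.and_eq_true,
      List.all_eq_true] at hx
    exact isalpha_not_isspace c (hx.2 c hcl)

-- A's pipeline over any cell list equals finishB of the scan fold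
theorem result_eq (cells : List String) :
    PySem.Str.join " " (PySem.Str.split₀ (PySem.Str.strip (PySem.Str.join "" (cells.foldl stepA []))))
      = PySem.Str.join " " (finishB (cells.foldl stepB ([], []))) := by
  obtain ⟨runs, cur, h1, h2, hA, hB⟩ := lockstep cells [] [] (by simp) (by simp)
  rw [show accOf ([] : List (List String)) ([] : List String) = [] from rfl] at hA
  rw [show (([] : List (List String)).map joinRun, ([] : List String)) = (([] : List String), ([] : List String)) from rfl] at hB
  rw [hA, hB]
  have hchars : (PySem.Str.join "" (accOf runs cur)).toList
      = (runs.map blockOf).flatMap (fun b => b ++ [' ']) ++ (cur.map String.toList).flatten := by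
    simp [PySem.Str.join, join_nil_flatten, chars_accOf]
  have hsplit : PySem.Str.split₀ (PySem.Str.strip (PySem.Str.join "" (accOf runs cur)))
      = ((runs.map blockOf) ++ (if (cur.map String.toList).flatten = [] then []
          else [(cur.map String.toList).flatten])).map String.ofList := by
    rw [PySem.Str.strip, PySem.Str.split₀, String.toList_ofList, split₀_strip, hchars,
      split₀_shape _ _ ?hb ?ht]
    case hb =>
      intro b hb
      obtain ⟨r, hr, rfl⟩ := List.mem_map.mp hb
      exact blockOf_props r (h1 r hr)
    case ht =>
      intro c hc
      have : c ∈ blockOf cur := by simpa [blockOf] using hc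
      exact (blockOf_props cur ⟨by rintro rfl; simp [blockOf] at this, h2⟩).2 c this
  rw [hsplit]
  have hmapRuns : List.map joinRun runs = List.map (String.ofList ∘ blockOf) runs :=
    List.map_congr_left (fun r _ => joinRun_eq r)
  by_cases hcur : cur = []
  · subst hcur
    simp [finishB, List.map_map, hmapRuns]
  · have hcur' : (cur.map String.toList).flatten ≠ [] := by
      have := (blockOf_props cur ⟨hcur, h2⟩).1
      simpa [blockOf] using this
    rw [if_neg hcur']
    have hne : ¬ cur.isEmpty = true := by simp [List.isEmpty_iff, hcur]
    have : PySem.Str.join "" cur = String.ofList ((cur.map String.toList).flatten) := by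
      simpa [joinRun, blockOf] using joinRun_eq cur
    simp [finishB, hne, List.map_map, hmapRuns, this]

-- the scan fold folded over an all-alpha prefix just extends the current run
theorem foldl_stepB_alpha (run : List String) (hrun : ∀ x ∈ run, PySem.Str.strIsalpha x = true) :
    ∀ (ws pre : List String), run.foldl stepB (ws, pre) = (ws, pre ++ run) := by
  induction run with
  | nil => intro ws pre; simp
  | cons x xs ih =>
      intro ws pre
      have hx : PySem.Str.strIsalpha x = true := hrun x (by simp)
      simp only [List.foldl_cons, stepB, hx, if_true]
      rw [ih (fun y hy => hrun y (by simp [hy])) ws (pre ++ [x])]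
      simp

-- finishB of the scan fold computes B's two-pointer word extraction
theorem finishB_eq_wordsB : ∀ (n : Nat) (cells : List String), cells.length ≤ n →
    ∀ (ws : List String), finishB (cells.foldl stepB (ws, [])) = ws ++ wordsB cells := by
  intro n
  induction n with
  | zero =>
      intro cells h ws
      rw [List.length_eq_zero_iff.mp (Nat.le_zero.mp h)]
      simp [finishB, wordsB]
  | succ n ih =>
      intro cells h ws
      cases cells with
      | nil => simp [finishB, wordsB]
      | cons c cs =>
          simp only [List.length_cons, Nat.add_le_add_iff_right] at h
          by_cases hc : PySem.Str.strIsalpha c = true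
          · have hrun : (c :: cs).takeWhile PySem.Str.strIsalpha
                = c :: cs.takeWhile PySem.Str.strIsalpha := List.takeWhile_cons_of_pos hc
            have hsplit : (c :: cs).takeWhile PySem.Str.strIsalpha
                ++ (c :: cs).dropWhile PySem.Str.strIsalpha = c :: cs :=
              List.takeWhile_append_dropWhile
            have hrunalpha : ∀ x ∈ (c :: cs).takeWhile PySem.Str.strIsalpha,
                PySem.Str.strIsalpha x = true := fun x hx => List.mem_takeWhile_imp hx
            have hrunne : (c :: cs).takeWhile PySem.Str.strIsalpha ≠ [] := by
              rw [hrun]; exact List.cons_ne_nil _ _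
            have hfold : (c :: cs).foldl stepB (ws, ([] : List String))
                = ((c :: cs).dropWhile PySem.Str.strIsalpha).foldl stepB
                    (ws, (c :: cs).takeWhile PySem.Str.strIsalpha) := by
              conv_lhs => rw [← hsplit]
              rw [List.foldl_append, foldl_stepB_alpha _ hrunalpha]
              simp
            have hwordsB : wordsB (c :: cs)
                = PySem.Str.join "" ((c :: cs).takeWhile PySem.Str.strIsalpha)
                    :: wordsB ((c :: cs).dropWhile PySem.Str.strIsalpha) := by
              rw [wordsB, if_pos hc]
            rw [hfold, hwordsB]
            cases hrest : (c :: cs).dropWhile PySem.Str.strIsalpha with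
            | nil =>
                simp [finishB, hrunne, wordsB]
            | cons d ds =>
                have hd : PySem.Str.strIsalpha d = false := by
                  have hh := List.head_dropWhile_not (p := PySem.Str.strIsalpha) (l := c :: cs)
                  rw [hrest] at hh
                  simpa using hh (List.cons_ne_nil _ _)
                have hstep : stepB (ws, (c :: cs).takeWhile PySem.Str.strIsalpha) d
                    = (ws ++ [PySem.Str.join "" ((c :: cs).takeWhile PySem.Str.strIsalpha)], []) := by
                  rw [stepB, if_neg (by rw [hd]; simp),
                    if_pos (by simp [hrunne])]
                have hlen : ds.length ≤ n := by
                  have h2 := congrArg List.length hsplit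
                  rw [hrest, hrun] at h2
                  simp only [List.length_append, List.length_cons] at h2
                  omega
                rw [List.foldl_cons, hstep, ih ds hlen _]
                have hw2 : wordsB (d :: ds) = wordsB ds := by
                  rw [wordsB, if_neg (by rw [hd]; simp)]
                rw [← hrest] at hw2 ⊢
                rw [hw2]
                simp
          · have hc' : PySem.Str.strIsalpha c = false := by simpa using hc
            have hstep : stepB (ws, ([] : List String)) c = (ws, []) := by
              rw [stepB, if_neg (by rw [hc']; simp)]
              simp
            rw [List.foldl_cons, hstep, ih cs h ws]
            rw [wordsB, if_neg (by rw [hc']; simp)]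

theorem innerA (m : List (List String)) (col : Int) (dc : List String) :
    (PySem.List.pyRange 0 (m.length : Int)).foldl
        (fun dc row => stepA dc (PySem.List.pyGetD (PySem.List.pyGetD m row []) col "")) dc
      = (m.map (fun r => PySem.List.pyGetD r col "")).foldl stepA dc := by
  have h := PySem.List.foldl_pyRange_zero_pyGetD' m ([] : List String)
    (fun a r => stepA a (PySem.List.pyGetD r col "")) dc
  rw [List.foldl_map]
  exact h

theorem innerB (m : List (List String)) (col : Int) :
    (PySem.List.pyRange 0 (m.length : Int)).map
        (fun row => PySem.List.pyGetD (PySem.List.pyGetD m row []) col "")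
      = m.map (fun r => PySem.List.pyGetD r col "") := by
  rw [show (fun row => PySem.List.pyGetD (PySem.List.pyGetD m row []) col "")
      = (fun r => PySem.List.pyGetD r col "") ∘ (fun row => PySem.List.pyGetD m row ([] : List String)) from rfl,
    ← List.map_map, PySem.List.map_pyGetD_pyRange_zero' m ([] : List String)]

-- ===== VERDICT (by name: the statement is the Claim_ definition above) =====
theorem process_col_spec : Claim_equal_process_col := by
  intro matrix _ _
  unfold Spec_process_col
  simp only [process_col, process_col_alt]
  simp only [innerA, innerB]
  have hA := foldl_nested (PySem.List.pyRange 0 (if !matrix.isEmpty then ((PySem.List.pyGetD matrix 0 []).length : Int) else 0))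
    (fun col => matrix.map (fun r => PySem.List.pyGetD r col "")) stepA [] []
  simp only [List.foldl_nil] at hA
  rw [hA, PySem.List.foldl_append_eq_flatMap, List.nil_append, result_eq,
    finishB_eq_wordsB _ _ (le_refl _), List.nil_append]
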